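-- pv_equiv track=rewrite | github.com/delroy2826/Programs_MasterBranch | Set_interview_question.py | fuction1
-- ===== SOURCE A (Python) =====
-- def fuction1(l,value):
--     if value==1:
--         count=0
--         for i in l:
--             if i%2==0:
--                 count+=i
--         return count
--     else:
--         count=0
--         for i in l:
--             if i%2!=0:
--                 count+=i
--         return count
-- ===== SOURCE B (Python) =====
-- def fuction1(l, value):
--     total = sum(l)
--     even = sum(filter(lambda i: i % 2 == 0, l))
--     return even if value == 1 else total - even
-- ===== Notes on version B (the rewrite author's own statement) =====
-- stated objective: alternative
-- what changed: B never accumulates the odd sum: it computes the whole-list total and the even-element sum with sum/filter and derives the odd answer arithmetically as total minus even, replacing A's two separate parity-conditioned accumulation loops.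
import Mathlib
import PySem

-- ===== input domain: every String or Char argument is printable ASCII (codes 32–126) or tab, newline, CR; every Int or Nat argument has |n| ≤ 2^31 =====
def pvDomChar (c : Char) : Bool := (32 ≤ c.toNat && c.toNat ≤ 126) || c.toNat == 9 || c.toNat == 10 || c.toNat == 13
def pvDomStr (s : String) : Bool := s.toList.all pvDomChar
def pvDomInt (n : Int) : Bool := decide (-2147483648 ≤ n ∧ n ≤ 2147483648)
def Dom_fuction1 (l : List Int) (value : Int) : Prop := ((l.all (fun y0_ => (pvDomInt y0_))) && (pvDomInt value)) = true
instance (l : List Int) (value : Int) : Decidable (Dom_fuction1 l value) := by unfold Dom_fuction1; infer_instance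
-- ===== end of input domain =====

-- B computes the list total and the even-element sum and derives the odd sum as
-- total minus even, instead of A's two parity-conditioned accumulation loops.

-- ===== PORT A =====
def fuction1 (l : List Int) (value : Int) : Int :=
  if value == 1 then
    l.foldl (fun count i => if PySem.Int.mod i 2 == 0 then count + i else count) 0
  else
    l.foldl (fun count i => if PySem.Int.mod i 2 != 0 then count + i else count) 0

-- ===== PORT B =====
def fuction1_alt (l : List Int) (value : Int) : Int :=
  let total := l.sum
  let even := (l.filter (fun i => PySem.Int.mod i 2 == 0)).sum
  if value == 1 then even else total - even

-- ===== PRECONDITION & SPEC =====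
def Spec_fuction1 (l : List Int) (value : Int) (out : Int) : Prop := out = fuction1_alt l value
instance (l : List Int) (value : Int) (out : Int) : Decidable (Spec_fuction1 l value out) := by unfold Spec_fuction1; infer_instance

-- ===== CLAIM =====
def Claim_equal_fuction1 : Prop := ∀ (l : List Int) (value : Int), Dom_fuction1 l value → Spec_fuction1 l value (fuction1 l value)

-- ===== LEMMAS AND PROOFS =====

-- A's filtered accumulation loop equals the sum of the filtered list.
theorem pvFoldFilter (p : Int → Bool) :
    ∀ (l : List Int) (c : Int),
      l.foldl (fun count i => if p i then count + i else count) c = c + (l.filter p).sum := by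
  intro l
  induction l with
  | nil => intro c; simp
  | cons x xs ih =>
    intro c
    simp only [List.foldl_cons]
    rw [ih, List.filter_cons]
    by_cases h : p x = true
    · rw [if_pos h, if_pos h, List.sum_cons]; ring
    · rw [if_neg h, if_neg h]

-- The even and the not-even parts sum to the whole list.
theorem pvSumSplit (l : List Int) :
    (l.filter (fun i => PySem.Int.mod i 2 == 0)).sum
      + (l.filter (fun i => PySem.Int.mod i 2 != 0)).sum = l.sum := by
  induction l with
  | nil => simp
  | cons x xs ih =>
    simp only [List.filter_cons, List.sum_cons]
    by_cases h : (PySem.Int.mod x 2 == 0) = true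
    · have h0 : PySem.Int.mod x 2 = 0 := eq_of_beq h
      rw [if_pos h, if_neg (by simp only [bne_iff_ne, ne_eq, not_not]; exact h0),
          List.sum_cons, ← ih]; ring
    · have h1 : PySem.Int.mod x 2 ≠ 0 := fun e => h (by rw [e]; decide)
      rw [if_neg h, if_pos (by simp only [bne_iff_ne, ne_eq]; exact h1),
          List.sum_cons, ← ih]; ring

-- ===== VERDICT =====
theorem fuction1_spec : Claim_equal_fuction1 := by
  intro l value _
  unfold Spec_fuction1 fuction1 fuction1_alt
  split
  · rw [pvFoldFilter]; ring
  · rw [pvFoldFilter, ← pvSumSplit l]; ring
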